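-- pv_equiv track=rewrite | github.com/shobhitmendiratta/Robocart_WarehouseNavigator | Warehouse_Navigator.py | get_node_index
-- ===== SOURCE A (Python) =====
-- def get_node_index(array, node):
--     sum_y = 0
--     for x, y in array:
--         if x == node[0]:
--             sum_y += node[1]
--             break
--         sum_y += y
--     return sum_y
-- ===== SOURCE B (Python) =====
-- def get_node_index(array, node):
--     # Right-to-left fold: a matching x overrides the suffix total with node[1];
--     # the leftmost match is applied last, so it wins, matching A's semantics.
--     total = 0
--     for x, y in reversed(array):
--         total = node[1] if x == node[0] else y + total
--     return total
-- ===== Notes on version B (the rewrite author's own statement) =====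
-- stated objective: alternative
-- what changed: B replaces A's forward early-break accumulating scan with a right-to-left fold over the whole list in which a matching x overrides the suffix total with node[1] (the leftmost match, applied last, wins); no break, no index search.
import Mathlib
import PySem

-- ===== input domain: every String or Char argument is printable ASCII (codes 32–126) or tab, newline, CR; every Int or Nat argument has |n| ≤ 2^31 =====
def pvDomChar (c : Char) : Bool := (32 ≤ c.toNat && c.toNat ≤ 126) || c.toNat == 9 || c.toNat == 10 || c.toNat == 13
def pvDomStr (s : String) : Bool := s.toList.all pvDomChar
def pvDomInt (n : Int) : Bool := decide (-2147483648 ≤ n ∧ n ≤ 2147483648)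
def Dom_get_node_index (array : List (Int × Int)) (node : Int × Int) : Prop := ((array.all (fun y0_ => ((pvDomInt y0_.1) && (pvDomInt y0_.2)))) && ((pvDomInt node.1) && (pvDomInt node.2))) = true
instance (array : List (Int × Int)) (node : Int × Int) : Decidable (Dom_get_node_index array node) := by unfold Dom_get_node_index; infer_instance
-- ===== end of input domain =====

-- B replaces A's forward early-break scan with a right-to-left fold in which a matching x
-- overrides the suffix total with node.2 (leftmost match applied last wins); objective: alternative.

-- ===== PORT A =====
-- A's loop with early break: structural recursion carrying the accumulator sum_y.
def get_node_index_go (node : Int × Int) (array : List (Int × Int)) (sum_y : Int) : Int :=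
  match array with
  | [] => sum_y
  | (x, y) :: rest =>
      if x = node.1 then sum_y + node.2
      else get_node_index_go node rest (sum_y + y)

def get_node_index (array : List (Int × Int)) (node : Int × Int) : Int :=
  get_node_index_go node array 0

-- ===== PORT B =====
-- Source B's 'for x, y in reversed(array)' loop updating total: foldl over array.reverse.
def get_node_index_alt (array : List (Int × Int)) (node : Int × Int) : Int :=
  array.reverse.foldl (fun total p => if p.1 = node.1 then node.2 else p.2 + total) 0

-- ===== PRECONDITION & SPEC =====
def Spec_get_node_index (array : List (Int × Int)) (node : Int × Int) (out : Int) : Prop := out = get_node_index_alt array node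
instance (array : List (Int × Int)) (node : Int × Int) (out : Int) : Decidable (Spec_get_node_index array node out) := by unfold Spec_get_node_index; infer_instance

-- ===== CLAIM (what is proved, stated in full; the proofs are below) =====
def Claim_equal_get_node_index : Prop := ∀ (array : List (Int × Int)) (node : Int × Int), Dom_get_node_index array node → Spec_get_node_index array node (get_node_index array node)

-- ===== LEMMAS AND PROOFS =====
theorem alt_reverse_foldr (array : List (Int × Int)) (node : Int × Int) :
    get_node_index_alt array node =
      array.foldr (fun p total => if p.1 = node.1 then node.2 else p.2 + total) 0 := by
  unfold get_node_index_alt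
  rw [List.foldl_reverse]

theorem go_eq_foldr (node : Int × Int) (array : List (Int × Int)) (acc : Int) :
    get_node_index_go node array acc =
      acc + array.foldr (fun p total => if p.1 = node.1 then node.2 else p.2 + total) 0 := by
  induction array generalizing acc with
  | nil => simp [get_node_index_go]
  | cons hd tl ih =>
      obtain ⟨x, y⟩ := hd
      by_cases hx : x = node.1
      · simp [get_node_index_go, hx]
      · simp only [get_node_index_go, if_neg hx, List.foldr_cons, ih]
        ring

-- ===== VERDICT (by name: the statement is the Claim_ definition above) =====
theorem get_node_index_spec : Claim_equal_get_node_index := by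
  intro array node _
  unfold Spec_get_node_index get_node_index
  rw [go_eq_foldr, alt_reverse_foldr]
  ring
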